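-- pv_equiv track=rewrite | github.com/Roman1-debug/Easy_Click | backend/services/query_expansion.py | expand_location
-- ===== SOURCE A (Python) =====
-- def expand_location(location: str) -> list[str]:
--     """
--     Expands common locations and adds "Remote".
--     Note: For a production-ready system, a full geo-dataset is recommended.
--     """
--     normalized = location.strip().capitalize()
--     expansions = [normalized]
--
--     # Common Indian city mappings
--     city_aliases = {
--         "Mumbai": ["Mumbai", "Navi Mumbai", "Thane"],
--         "Bangalore": ["Bangalore", "Bengaluru"],
--         "Delhi": ["Delhi", "New Delhi", "Gurgaon", "Noida", "NCR"],
--         "Pune": ["Pune", "Pimpri-Chinchwad"],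
--         "Hyderabad": ["Hyderabad", "Secunderabad"],
--     }
--
--     for city, aliases in city_aliases.items():
--         if normalized.lower() in [a.lower() for a in aliases]:
--             # Add other related locations from the same region
--             expansions.extend([a for a in aliases if a.lower() != normalized.lower()])
--             break
--
--     expansions.append("Remote")
--     return list(dict.fromkeys(expansions)) # Deduplicate while preserving order
-- ===== SOURCE B (Python) =====
-- # Fully precomputed answer tails: lowercased alias -> the complete rest of the
-- # result (related aliases of the group, excluding the alias itself, plus "Remote").
-- # The per-call group scan, the filter and the dedup pass all disappear.
-- _ALIAS_GROUPS = [
--     ["Mumbai", "Navi Mumbai", "Thane"],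
--     ["Bangalore", "Bengaluru"],
--     ["Delhi", "New Delhi", "Gurgaon", "Noida", "NCR"],
--     ["Pune", "Pimpri-Chinchwad"],
--     ["Hyderabad", "Secunderabad"],
-- ]
--
-- _TAILS = {
--     a.lower(): [x for x in group if x.lower() != a.lower()] + ["Remote"]
--     for group in _ALIAS_GROUPS
--     for a in group
-- }
--
--
-- def expand_location(location: str) -> list[str]:
--     normalized = location.strip().capitalize()
--     tail = _TAILS.get(normalized.lower(), ["Remote"])
--     # "Remote" is never a known alias, so the only possible duplicate in the
--     # result is normalized itself being "Remote".
--     return tail if normalized == "Remote" else [normalized] + tail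
-- ===== Notes on version B (the rewrite author's own statement) =====
-- stated objective: alternative
-- what changed: Instead of A's per-call scan over the alias groups followed by a filter and an order-preserving dedup pass, B precomputes once a table from lowercased alias to the complete answer tail (the other group members plus 'Remote'); a call is then one lookup and one cons, with no filtering and no dedup (the only possible duplicate, normalized == 'Remote', is handled directly).
import Mathlib
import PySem

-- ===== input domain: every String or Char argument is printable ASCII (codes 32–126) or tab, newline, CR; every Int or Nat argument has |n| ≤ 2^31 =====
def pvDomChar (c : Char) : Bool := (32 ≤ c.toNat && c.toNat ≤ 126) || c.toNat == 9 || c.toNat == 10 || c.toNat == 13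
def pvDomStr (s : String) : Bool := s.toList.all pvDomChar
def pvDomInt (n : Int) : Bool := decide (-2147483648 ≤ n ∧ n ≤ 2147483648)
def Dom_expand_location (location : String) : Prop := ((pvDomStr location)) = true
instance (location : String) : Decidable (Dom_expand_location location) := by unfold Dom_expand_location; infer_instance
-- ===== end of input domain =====

-- B replaces A's per-call group scan + filter + dedup by a table, precomputed once,
-- from lowercased alias to the COMPLETE tail of the answer (objective: alternative).

-- str.capitalize(): first char uppercased, the rest lowered (exact on the ASCII domain;
-- hand port, PySem has no capitalize primitive). Used by both ports, as in both Pythons.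
def pyCapitalize (s : String) : String :=
  match s.toList with
  | [] => ""
  | c :: cs => String.ofList (PySem.Chars.upperChar c :: PySem.Chars.lower cs)

-- ===== PORT A =====
def cityAliasesA : List (String × List String) :=
  [("Mumbai", ["Mumbai", "Navi Mumbai", "Thane"]),
   ("Bangalore", ["Bangalore", "Bengaluru"]),
   ("Delhi", ["Delhi", "New Delhi", "Gurgaon", "Noida", "NCR"]),
   ("Pune", ["Pune", "Pimpri-Chinchwad"]),
   ("Hyderabad", ["Hyderabad", "Secunderabad"])]

-- the 'for city, aliases in ... : if ... : extend; break' loop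
def loopA (normalized : String) : List (String × List String) → List String
  | [] => []
  | (_, aliases) :: rest =>
    if (aliases.map PySem.Str.lower).contains (PySem.Str.lower normalized) then
      aliases.filter (fun a => PySem.Str.lower a != PySem.Str.lower normalized)
    else loopA normalized rest

def expand_location (location : String) : List String :=
  let normalized := pyCapitalize (PySem.Str.strip location)
  let expansions := [normalized] ++ loopA normalized cityAliasesA ++ ["Remote"]
  PySem.List.dedup expansions

-- ===== PORT B =====
def aliasGroupsB : List (List String) :=
  [["Mumbai", "Navi Mumbai", "Thane"],
   ["Bangalore", "Bengaluru"],
   ["Delhi", "New Delhi", "Gurgaon", "Noida", "NCR"],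
   ["Pune", "Pimpri-Chinchwad"],
   ["Hyderabad", "Secunderabad"]]

-- _TAILS: {a.lower(): [x for x in group if x.lower() != a.lower()] + ["Remote"] ...}
def tailsB : PySem.Dict String (List String) :=
  aliasGroupsB.foldl
    (fun d group =>
      group.foldl
        (fun d a =>
          d.insert (PySem.Str.lower a)
            ((group.filter (fun x => PySem.Str.lower x != PySem.Str.lower a)) ++ ["Remote"]))
        d)
    PySem.Dict.empty

def expand_location_alt (location : String) : List String :=
  let normalized := pyCapitalize (PySem.Str.strip location)
  let tail := tailsB.getD (PySem.Str.lower normalized) ["Remote"]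
  if normalized = "Remote" then tail else normalized :: tail

-- ===== PRECONDITION & SPEC =====
def Spec_expand_location (location : String) (out : List String) : Prop := out = expand_location_alt location
instance (location : String) (out : List String) : Decidable (Spec_expand_location location out) := by unfold Spec_expand_location; infer_instance

-- ===== CLAIM (what is proved, stated in full; the proofs are below) =====
def Claim_equal_expand_location : Prop := ∀ (location : String), Dom_expand_location location → Spec_expand_location location (expand_location location)

-- ===== LEMMAS AND PROOFS =====

-- A's loop with normalized.lower() recomputed per test, rephrased over the fixed key
def loopK (k : String) : List (String × List String) → List String
  | [] => []
  | (_, aliases) :: rest =>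
    if (aliases.map PySem.Str.lower).contains k then
      aliases.filter (fun a => PySem.Str.lower a != k)
    else loopK k rest

theorem loopA_eq_loopK (n : String) (gs : List (String × List String)) :
    loopA n gs = loopK (PySem.Str.lower n) gs := by
  induction gs with
  | nil => rfl
  | cons g rest ih => cases g; simp only [loopA, loopK, ih]

-- dedup is the identity on a duplicate-free list
theorem dedup_cons_of (n : String) (t : List String) (hn : n ∉ t) (ht : t.Nodup) :
    PySem.List.dedup (n :: t) = n :: t := by
  rw [PySem.List.dedup_eq_ofList]
  exact PySem.Set.ofList_eq_self_of_nodup _ (List.nodup_cons.mpr ⟨hn, ht⟩)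

-- one matched-key case: A's scan yields `filtered`, B's table yields `tail = filtered ++ ["Remote"]`,
-- nothing in the tail can collide with `n` (their lowercases differ), so A's dedup is the identity
theorem case_key (n key : String) (filtered tail : List String)
    (hk : PySem.Str.lower n = key)
    (hloop : loopK key cityAliasesA = filtered)
    (hget : tailsB.getD key ["Remote"] = tail)
    (htail : tail = filtered ++ ["Remote"])
    (hnot : ∀ e ∈ tail, PySem.Str.lower e ≠ key)
    (hnodup : tail.Nodup) :
    PySem.List.dedup ([n] ++ loopK (PySem.Str.lower n) cityAliasesA ++ ["Remote"]) =
      (if n = "Remote" then tailsB.getD (PySem.Str.lower n) ["Remote"]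
       else n :: tailsB.getD (PySem.Str.lower n) ["Remote"]) := by
  have hrem : "Remote" ∈ tail := by rw [htail]; simp
  have hne : n ≠ "Remote" := by
    intro h
    exact hnot "Remote" hrem (by rw [← h, hk])
  have hnmem : n ∉ tail := fun hm => hnot n hm hk
  rw [hk, hloop, hget, if_neg hne]
  have : ([n] ++ filtered ++ ["Remote"]) = n :: tail := by rw [htail]; simp
  rw [this]
  exact dedup_cons_of n tail hnmem hnodup

-- the unmatched case: no group tests positive and the table has no entry, so A appends
-- only "Remote" and the only possible duplicate is n = "Remote" itself
theorem case_none (k : String)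
    (hk1 : k ≠ "mumbai")
    (hk2 : k ≠ "navi mumbai")
    (hk3 : k ≠ "thane")
    (hk4 : k ≠ "bangalore")
    (hk5 : k ≠ "bengaluru")
    (hk6 : k ≠ "delhi")
    (hk7 : k ≠ "new delhi")
    (hk8 : k ≠ "gurgaon")
    (hk9 : k ≠ "noida")
    (hk10 : k ≠ "ncr")
    (hk11 : k ≠ "pune")
    (hk12 : k ≠ "pimpri-chinchwad")
    (hk13 : k ≠ "hyderabad")
    (hk14 : k ≠ "secunderabad")
    : loopK k cityAliasesA = [] ∧ tailsB.getD k ["Remote"] = ["Remote"] := by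
  have hrev : tailsB = PySem.Dict.mk
      [("mumbai", ["Navi Mumbai", "Thane", "Remote"]),
       ("navi mumbai", ["Mumbai", "Thane", "Remote"]),
       ("thane", ["Mumbai", "Navi Mumbai", "Remote"]),
       ("bangalore", ["Bengaluru", "Remote"]),
       ("bengaluru", ["Bangalore", "Remote"]),
       ("delhi", ["New Delhi", "Gurgaon", "Noida", "NCR", "Remote"]),
       ("new delhi", ["Delhi", "Gurgaon", "Noida", "NCR", "Remote"]),
       ("gurgaon", ["Delhi", "New Delhi", "Noida", "NCR", "Remote"]),
       ("noida", ["Delhi", "New Delhi", "Gurgaon", "NCR", "Remote"]),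
       ("ncr", ["Delhi", "New Delhi", "Gurgaon", "Noida", "Remote"]),
       ("pune", ["Pimpri-Chinchwad", "Remote"]),
       ("pimpri-chinchwad", ["Pune", "Remote"]),
       ("hyderabad", ["Secunderabad", "Remote"]),
       ("secunderabad", ["Hyderabad", "Remote"])] := by decide
  have e1 : PySem.Str.lower "Mumbai" = "mumbai" := by decide
  have e2 : PySem.Str.lower "Navi Mumbai" = "navi mumbai" := by decide
  have e3 : PySem.Str.lower "Thane" = "thane" := by decide
  have e4 : PySem.Str.lower "Bangalore" = "bangalore" := by decide
  have e5 : PySem.Str.lower "Bengaluru" = "bengaluru" := by decide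
  have e6 : PySem.Str.lower "Delhi" = "delhi" := by decide
  have e7 : PySem.Str.lower "New Delhi" = "new delhi" := by decide
  have e8 : PySem.Str.lower "Gurgaon" = "gurgaon" := by decide
  have e9 : PySem.Str.lower "Noida" = "noida" := by decide
  have e10 : PySem.Str.lower "NCR" = "ncr" := by decide
  have e11 : PySem.Str.lower "Pune" = "pune" := by decide
  have e12 : PySem.Str.lower "Pimpri-Chinchwad" = "pimpri-chinchwad" := by decide
  have e13 : PySem.Str.lower "Hyderabad" = "hyderabad" := by decide
  have e14 : PySem.Str.lower "Secunderabad" = "secunderabad" := by decide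
  have g1 : ¬"mumbai" = k := fun h => hk1 h.symm
  have g2 : ¬"navi mumbai" = k := fun h => hk2 h.symm
  have g3 : ¬"thane" = k := fun h => hk3 h.symm
  have g4 : ¬"bangalore" = k := fun h => hk4 h.symm
  have g5 : ¬"bengaluru" = k := fun h => hk5 h.symm
  have g6 : ¬"delhi" = k := fun h => hk6 h.symm
  have g7 : ¬"new delhi" = k := fun h => hk7 h.symm
  have g8 : ¬"gurgaon" = k := fun h => hk8 h.symm
  have g9 : ¬"noida" = k := fun h => hk9 h.symm
  have g10 : ¬"ncr" = k := fun h => hk10 h.symm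
  have g11 : ¬"pune" = k := fun h => hk11 h.symm
  have g12 : ¬"pimpri-chinchwad" = k := fun h => hk12 h.symm
  have g13 : ¬"hyderabad" = k := fun h => hk13 h.symm
  have g14 : ¬"secunderabad" = k := fun h => hk14 h.symm
  constructor
  · simp [loopK, cityAliasesA, e1, e2, e3, e4, e5, e6, e7, e8, e9, e10, e11, e12, e13, e14, hk1, hk2, hk3, hk4, hk5, hk6, hk7, hk8, hk9, hk10, hk11, hk12, hk13, hk14]
  · simp [hrev, PySem.Dict.getD, PySem.Dict.get?, g1, g2, g3, g4, g5, g6, g7, g8, g9, g10, g11, g12, g13, g14]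

-- ===== VERDICT (by name: the statement is the Claim_ definition above) =====
theorem expand_location_spec : Claim_equal_expand_location := by
  intro location _
  show expand_location location = expand_location_alt location
  simp only [expand_location, expand_location_alt, loopA_eq_loopK]
  by_cases h1 : PySem.Str.lower (pyCapitalize (PySem.Str.strip location)) = "mumbai"
  · exact case_key _ _ ["Navi Mumbai", "Thane"] ["Navi Mumbai", "Thane", "Remote"] h1 (by decide) (by decide) (by decide) (by decide) (by decide)
  by_cases h2 : PySem.Str.lower (pyCapitalize (PySem.Str.strip location)) = "navi mumbai"
  · exact case_key _ _ ["Mumbai", "Thane"] ["Mumbai", "Thane", "Remote"] h2 (by decide) (by decide) (by decide) (by decide) (by decide)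
  by_cases h3 : PySem.Str.lower (pyCapitalize (PySem.Str.strip location)) = "thane"
  · exact case_key _ _ ["Mumbai", "Navi Mumbai"] ["Mumbai", "Navi Mumbai", "Remote"] h3 (by decide) (by decide) (by decide) (by decide) (by decide)
  by_cases h4 : PySem.Str.lower (pyCapitalize (PySem.Str.strip location)) = "bangalore"
  · exact case_key _ _ ["Bengaluru"] ["Bengaluru", "Remote"] h4 (by decide) (by decide) (by decide) (by decide) (by decide)
  by_cases h5 : PySem.Str.lower (pyCapitalize (PySem.Str.strip location)) = "bengaluru"
  · exact case_key _ _ ["Bangalore"] ["Bangalore", "Remote"] h5 (by decide) (by decide) (by decide) (by decide) (by decide)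
  by_cases h6 : PySem.Str.lower (pyCapitalize (PySem.Str.strip location)) = "delhi"
  · exact case_key _ _ ["New Delhi", "Gurgaon", "Noida", "NCR"] ["New Delhi", "Gurgaon", "Noida", "NCR", "Remote"] h6 (by decide) (by decide) (by decide) (by decide) (by decide)
  by_cases h7 : PySem.Str.lower (pyCapitalize (PySem.Str.strip location)) = "new delhi"
  · exact case_key _ _ ["Delhi", "Gurgaon", "Noida", "NCR"] ["Delhi", "Gurgaon", "Noida", "NCR", "Remote"] h7 (by decide) (by decide) (by decide) (by decide) (by decide)
  by_cases h8 : PySem.Str.lower (pyCapitalize (PySem.Str.strip location)) = "gurgaon"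
  · exact case_key _ _ ["Delhi", "New Delhi", "Noida", "NCR"] ["Delhi", "New Delhi", "Noida", "NCR", "Remote"] h8 (by decide) (by decide) (by decide) (by decide) (by decide)
  by_cases h9 : PySem.Str.lower (pyCapitalize (PySem.Str.strip location)) = "noida"
  · exact case_key _ _ ["Delhi", "New Delhi", "Gurgaon", "NCR"] ["Delhi", "New Delhi", "Gurgaon", "NCR", "Remote"] h9 (by decide) (by decide) (by decide) (by decide) (by decide)
  by_cases h10 : PySem.Str.lower (pyCapitalize (PySem.Str.strip location)) = "ncr"
  · exact case_key _ _ ["Delhi", "New Delhi", "Gurgaon", "Noida"] ["Delhi", "New Delhi", "Gurgaon", "Noida", "Remote"] h10 (by decide) (by decide) (by decide) (by decide) (by decide)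
  by_cases h11 : PySem.Str.lower (pyCapitalize (PySem.Str.strip location)) = "pune"
  · exact case_key _ _ ["Pimpri-Chinchwad"] ["Pimpri-Chinchwad", "Remote"] h11 (by decide) (by decide) (by decide) (by decide) (by decide)
  by_cases h12 : PySem.Str.lower (pyCapitalize (PySem.Str.strip location)) = "pimpri-chinchwad"
  · exact case_key _ _ ["Pune"] ["Pune", "Remote"] h12 (by decide) (by decide) (by decide) (by decide) (by decide)
  by_cases h13 : PySem.Str.lower (pyCapitalize (PySem.Str.strip location)) = "hyderabad"
  · exact case_key _ _ ["Secunderabad"] ["Secunderabad", "Remote"] h13 (by decide) (by decide) (by decide) (by decide) (by decide)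
  by_cases h14 : PySem.Str.lower (pyCapitalize (PySem.Str.strip location)) = "secunderabad"
  · exact case_key _ _ ["Hyderabad"] ["Hyderabad", "Remote"] h14 (by decide) (by decide) (by decide) (by decide) (by decide)
  obtain ⟨hl, hg⟩ := case_none (PySem.Str.lower (pyCapitalize (PySem.Str.strip location))) h1 h2 h3 h4 h5 h6 h7 h8 h9 h10 h11 h12 h13 h14
  rw [hl, hg]
  by_cases hn : pyCapitalize (PySem.Str.strip location) = "Remote"
  · rw [if_pos hn, hn]; decide
  · rw [if_neg hn]
    exact dedup_cons_of _ ["Remote"] (by simp [hn]) (by decide)
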